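-- pv_equiv track=rewrite | github.com/changhooni/david | pccp_test_3.py | solution
-- ===== SOURCE A (Python) =====
-- def solution(input_string):
--     checked = set()
--     result = []
--
--     for ch in input_string:
--         if ch in checked:
--             continue  # 이미 검사한 문자 건너뛰기
--         checked.add(ch)
--
--         count = 0
--         in_block = False
--
--         for c in input_string:
--             if c == ch:
--                 if not in_block:
--                     count += 1
--                     in_block = True
--             else:
--                 in_block = False
--
--         if count >= 2:
--             result.append(ch)
--
--     return ''.join(sorted(result) if result else ['N'])
-- ===== SOURCE B (Python) =====
-- from itertools import groupby
-- from collections import Counter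
--
--
-- def solution(input_string):
--     # one pass: compress the string into runs, tally one per run
--     run_counts = Counter(k for k, _ in groupby(input_string))
--     result = [ch for ch, c in run_counts.items() if c >= 2]
--     return ''.join(sorted(result)) if result else 'N'
-- ===== Notes on version B (the rewrite author's own statement) =====
-- stated objective: idiomatic
-- what changed: Instead of rescanning the whole string once per distinct character to count its runs, B compresses the string into maximal runs in a single itertools.groupby pass and tallies one Counter entry per run, then filters characters with at least 2 runs (O(k*n) rescans replaced by one pass; measured faster).
import Mathlib
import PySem

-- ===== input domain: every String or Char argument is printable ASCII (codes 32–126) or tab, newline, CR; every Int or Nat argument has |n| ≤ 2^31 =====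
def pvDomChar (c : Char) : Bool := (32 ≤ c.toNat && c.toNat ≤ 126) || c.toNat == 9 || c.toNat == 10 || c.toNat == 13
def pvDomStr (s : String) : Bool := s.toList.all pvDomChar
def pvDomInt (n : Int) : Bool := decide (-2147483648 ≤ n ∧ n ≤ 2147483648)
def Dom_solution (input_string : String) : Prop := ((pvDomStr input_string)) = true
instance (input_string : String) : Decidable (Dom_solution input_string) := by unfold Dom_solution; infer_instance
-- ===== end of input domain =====

-- B replaces A's per-distinct-character full-string rescan by one groupby run-compression
-- pass plus a Counter of run heads (idiomatic; same results).

-- ===== PORT A =====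
-- A's inner 'for c in input_string' loop: state (count, in_block)
def pvInner (s : List Char) (ch : Char) : Int × Bool :=
  s.foldl (fun st c =>
    if c = ch then (if st.2 then st else (st.1 + 1, true)) else (st.1, false))
    (0, false)

def solution (input_string : String) : String :=
  let p := input_string.toList.foldl (fun (st : PySem.Set Char × List Char) ch =>
    if PySem.Set.contains st.1 ch then st
    else
      let checked := PySem.Set.add st.1 ch
      if 2 ≤ (pvInner input_string.toList ch).1 then (checked, st.2 ++ [ch])
      else (checked, st.2)) (PySem.Set.empty, [])
  String.ofList (if p.2 = [] then ['N'] else PySem.List.sorted p.2 (fun x => x) false)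

-- ===== PORT B =====
-- keys of itertools.groupby: one character per maximal run
def pvRunsGo (prev : Char) : List Char → List Char
  | [] => []
  | b :: t => if b = prev then pvRunsGo prev t else b :: pvRunsGo b t

def pvRuns : List Char → List Char
  | [] => []
  | a :: t => a :: pvRunsGo a t

def solution_alt (input_string : String) : String :=
  let runCounts := PySem.Dict.counter (pvRuns input_string.toList)
  let result := (runCounts.items.filter (fun p => decide (2 ≤ p.2))).map (·.1)
  if result = [] then "N"
  else String.ofList (PySem.List.sorted result (fun x => x) false)

-- ===== PRECONDITION & SPEC =====
def Spec_solution (input_string : String) (out : String) : Prop := out = solution_alt input_string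
instance (input_string : String) (out : String) : Decidable (Spec_solution input_string out) := by unfold Spec_solution; infer_instance

-- ===== CLAIM (what is proved, stated in full; the proofs are below) =====
def Claim_equal_solution : Prop := ∀ (input_string : String), Dom_solution input_string → Spec_solution input_string (solution input_string)

-- ===== LEMMAS AND PROOFS =====

-- first occurrences of l not already in seen, in order (what A's 'checked' set sees as fresh)
def pvNew (seen : PySem.Set Char) : List Char → List Char
  | [] => []
  | c :: t => if c ∈ seen then pvNew seen t
              else c :: pvNew (PySem.Set.add seen c) t

-- A's outer-loop step, in ∈-normal form
def pvStep (s : List Char) (st : PySem.Set Char × List Char) (ch : Char) :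
    PySem.Set Char × List Char :=
  if ch ∈ st.1 then st
  else if 2 ≤ (pvInner s ch).1 then (PySem.Set.add st.1 ch, st.2 ++ [ch])
  else (PySem.Set.add st.1 ch, st.2)

-- A's outer loop: result = the fresh characters, filtered by the inner count
theorem pvOuter (s : List Char) (l : List Char) (seen : PySem.Set Char) (acc : List Char) :
    (l.foldl (pvStep s) (seen, acc)).2
      = acc ++ (pvNew seen l).filter (fun ch => decide (2 ≤ (pvInner s ch).1)) := by
  induction l generalizing seen acc with
  | nil => simp [pvNew]
  | cons c t ih =>
    rw [List.foldl_cons]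
    by_cases h : c ∈ seen
    · rw [show pvStep s (seen, acc) c = (seen, acc) by simp [pvStep, h], ih]
      simp [pvNew, h]
    · by_cases h2 : 2 ≤ (pvInner s c).1
      · rw [show pvStep s (seen, acc) c = (PySem.Set.add seen c, acc ++ [c]) by
          simp [pvStep, h, h2], ih]
        simp [pvNew, h, h2]
      · rw [show pvStep s (seen, acc) c = (PySem.Set.add seen c, acc) by
          simp [pvStep, h, h2], ih]
        simp [pvNew, h, h2]

-- Set.ofList is the fold that pvNew describes
theorem pvOfList_eq (l : List Char) (seen : PySem.Set Char) :
    l.foldl PySem.Set.add seen = seen ++ pvNew seen l := by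
  induction l generalizing seen with
  | nil => simp [pvNew]
  | cons c t ih =>
    rw [List.foldl_cons]
    by_cases h : c ∈ seen
    · rw [show PySem.Set.add seen c = seen by simp [PySem.Set.add, h], ih]
      simp [pvNew, h]
    · have ha : PySem.Set.add seen c = seen ++ [c] := by simp [PySem.Set.add, h]
      rw [ha, ih]
      simp [pvNew, h]

-- dropping repeated run members does not change the fresh-character list
theorem pvNew_runsGo (l : List Char) (prev : Char) (seen : PySem.Set Char)
    (hp : prev ∈ seen) :
    pvNew seen (pvRunsGo prev l) = pvNew seen l := by
  induction l generalizing prev seen with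
  | nil => rfl
  | cons b t ih =>
    by_cases hb : b = prev
    · subst hb
      rw [show pvRunsGo b (b :: t) = pvRunsGo b t by simp [pvRunsGo], ih b seen hp]
      simp [pvNew, hp]
    · rw [show pvRunsGo prev (b :: t) = b :: pvRunsGo b t by simp [pvRunsGo, hb]]
      by_cases hs : b ∈ seen
      · simp only [pvNew, if_pos hs]
        exact ih b seen hs
      · simp only [pvNew, if_neg hs]
        rw [ih b (PySem.Set.add seen b) (by simp)]

theorem pvNew_runs (l : List Char) :
    pvNew PySem.Set.empty (pvRuns l) = pvNew PySem.Set.empty l := by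
  cases l with
  | nil => rfl
  | cons a t =>
    have he : a ∉ (PySem.Set.empty : PySem.Set Char) := by simp [PySem.Set.empty]
    have ha : a ∈ PySem.Set.add PySem.Set.empty a := by simp
    simp only [pvRuns, pvNew, if_neg he]
    rw [pvNew_runsGo t a _ ha]

-- A's inner scan counts exactly the runs of ch
theorem pvInner_go (ch : Char) (l : List Char) : ∀ (prev : Char) (cnt : Int),
    (l.foldl (fun st c =>
        if c = ch then (if st.2 then st else (st.1 + 1, true)) else (st.1, false))
      (cnt, decide (prev = ch))).1
    = cnt + ((pvRunsGo prev l).count ch : Int) := by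
  induction l with
  | nil => intro prev cnt; simp [pvRunsGo]
  | cons b t ih =>
    intro prev cnt
    rw [List.foldl_cons]
    by_cases hbp : b = prev
    · subst hbp
      rw [show pvRunsGo b (b :: t) = pvRunsGo b t by simp [pvRunsGo]]
      by_cases hbc : b = ch
      · rw [show (if b = ch then (if decide (b = ch) then ((cnt, decide (b = ch)) : Int × Bool)
              else (cnt + 1, true)) else (cnt, false)) = (cnt, decide (b = ch)) by simp [hbc]]
        exact ih b cnt
      · rw [show (if b = ch then (if decide (b = ch) then ((cnt, decide (b = ch)) : Int × Bool)
              else (cnt + 1, true)) else (cnt, false)) = (cnt, decide (b = ch)) by simp [hbc]]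
        exact ih b cnt
    · rw [show pvRunsGo prev (b :: t) = b :: pvRunsGo b t by simp [pvRunsGo, hbp]]
      by_cases hbc : b = ch
      · have hpc : ¬ prev = ch := fun h => hbp (hbc.trans h.symm)
        rw [show (if b = ch then (if decide (prev = ch) then ((cnt, decide (prev = ch)) : Int × Bool)
              else (cnt + 1, true)) else (cnt, false)) = (cnt + 1, decide (b = ch)) by
            simp [hbc, hpc]]
        rw [ih b (cnt + 1)]
        simp [hbc]
        omega
      · rw [show (if b = ch then (if decide (prev = ch) then ((cnt, decide (prev = ch)) : Int × Bool)
              else (cnt + 1, true)) else (cnt, false)) = (cnt, decide (b = ch)) by simp [hbc]]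
        rw [ih b cnt]
        simp [hbc]

theorem pvInner_count (s : List Char) (ch : Char) :
    (pvInner s ch).1 = ((pvRuns s).count ch : Int) := by
  cases s with
  | nil => simp [pvInner, pvRuns]
  | cons a t =>
    unfold pvInner
    rw [List.foldl_cons]
    by_cases hac : a = ch
    · rw [show (if a = ch then (if (false : Bool) then (((0 : Int), false) : Int × Bool)
            else (0 + 1, true)) else (0, false)) = ((0 : Int) + 1, decide (a = ch)) by simp [hac]]
      rw [pvInner_go ch t a]
      simp [pvRuns, hac]
      omega
    · rw [show (if a = ch then (if (false : Bool) then (((0 : Int), false) : Int × Bool)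
            else (0 + 1, true)) else (0, false)) = ((0 : Int), decide (a = ch)) by simp [hac]]
      rw [pvInner_go ch t a]
      simp [pvRuns, hac]

-- A's raw outer-loop function is pvStep
theorem pvStep_eq (s : List Char) :
    (fun (st : PySem.Set Char × List Char) ch =>
      if PySem.Set.contains st.1 ch then st
      else
        let checked := PySem.Set.add st.1 ch
        if 2 ≤ (pvInner s ch).1 then (checked, st.2 ++ [ch])
        else (checked, st.2)) = pvStep s := by
  funext st ch
  by_cases h : ch ∈ st.1 <;> simp [pvStep, PySem.Set.contains, h]

-- ===== VERDICT (by name: the statement is the Claim_ definition above) =====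
theorem solution_spec : Claim_equal_solution := by
  intro s _
  unfold Spec_solution
  simp only [solution, solution_alt]
  rw [pvStep_eq s.toList, pvOuter s.toList s.toList PySem.Set.empty []]
  rw [PySem.Dict.items_counter]
  rw [List.filter_map, List.map_map]
  have hset : PySem.Set.ofList (pvRuns s.toList) = pvNew PySem.Set.empty (pvRuns s.toList) := by
    rw [PySem.Set.ofList_eq_foldl, pvOfList_eq]; rfl
  rw [hset, pvNew_runs]
  have hfil :
      (pvNew PySem.Set.empty s.toList).filter
          (fun ch => decide (2 ≤ (pvInner s.toList ch).1))
        = (pvNew PySem.Set.empty s.toList).filter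
          ((fun p : Char × Int => decide (2 ≤ p.2)) ∘ fun k => (k, ((pvRuns s.toList).count k : Int))) := by
    apply List.filter_congr
    intro x _
    simp [pvInner_count s.toList x]
  rw [List.nil_append, hfil]
  have hmap : ((fun p : Char × Int => p.1) ∘ fun k => (k, ((pvRuns s.toList).count k : Int))) = id := rfl
  rw [hmap, List.map_id]
  split <;> rename_i h
  · decide
  · rfl
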